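-- pv_equiv track=rewrite | github.com/yae-miko-0627/fuzz-project | mini_afl_py/mutators/mjs_mutator.py | _basic_balance_check
-- ===== SOURCE A (Python) =====
-- def _count_unescaped(text: str, ch: str) -> int:
--     cnt = 0
--     i = 0
--     while True:
--         i = text.find(ch, i)
--         if i == -1:
--             break
--         # 统计前置反斜杠数量
--         back = 0
--         j = i - 1
--         while j >= 0 and text[j] == '\\':
--             back += 1
--             j -= 1
--         if back % 2 == 0:
--             cnt += 1
--         i += 1
--     return cnt
--
-- def _basic_balance_check(s: str) -> bool:
--     # 检查括号/方括号/大括号与引号的简单平衡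
--     for o, c in [('(', ')'), ('[', ']'), ('{', '}')]:
--         if s.count(o) != s.count(c):
--             return False
--     for q in ['"', "'", '`']:
--         if _count_unescaped(s, q) % 2 != 0:
--             return False
--     return True
-- ===== SOURCE B (Python) =====
-- def _basic_balance_check(s: str) -> bool:
--     # single pass: bracket counters + quote parity bits with a backslash escape toggle
--     op = cp = ob = cb = oc = cc = 0
--     dq = sq = bq = False
--     esc = False
--     for ch in s:
--         if ch == '(':
--             op += 1
--         elif ch == ')':
--             cp += 1
--         elif ch == '[':
--             ob += 1
--         elif ch == ']':
--             cb += 1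
--         elif ch == '{':
--             oc += 1
--         elif ch == '}':
--             cc += 1
--         if not esc:
--             if ch == '"':
--                 dq = not dq
--             elif ch == "'":
--                 sq = not sq
--             elif ch == '`':
--                 bq = not bq
--         esc = (ch == '\\') and not esc
--     return op == cp and ob == cb and oc == cc and not (dq or sq or bq)
-- ===== Notes on version B (the rewrite author's own statement) =====
-- stated objective: alternative
-- what changed: A makes six whole-string count passes plus, per quote character, repeated find calls each followed by a backward scan over the preceding backslash run; B is one single left-to-right pass keeping six bracket counters, three quote parity bits and a one-character escape toggle.
import Mathlib
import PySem

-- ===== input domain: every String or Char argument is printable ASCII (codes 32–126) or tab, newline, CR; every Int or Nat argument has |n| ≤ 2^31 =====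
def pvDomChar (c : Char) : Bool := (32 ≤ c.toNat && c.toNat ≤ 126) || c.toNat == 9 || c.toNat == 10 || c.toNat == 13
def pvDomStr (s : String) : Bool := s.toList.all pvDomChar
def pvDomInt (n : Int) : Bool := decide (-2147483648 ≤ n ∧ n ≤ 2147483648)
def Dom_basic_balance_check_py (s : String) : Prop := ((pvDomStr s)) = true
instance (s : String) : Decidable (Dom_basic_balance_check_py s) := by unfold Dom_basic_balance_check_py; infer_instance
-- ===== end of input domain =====

-- B replaces A's per-character str.count / repeated str.find-and-scan-backwards passes by one
-- single left-to-right pass with bracket counters, quote parity bits and an escape toggle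
-- (objective: alternative decomposition).

-- ===== PORT A =====
-- inner 'while j >= 0 and text[j] == backslash' loop of _count_unescaped; whenever 0 ≤ j the
-- index is in range at every call site, so List.getD is exact for Python's text[j] there
def pvBackGo (text : List Char) (j : Int) (back : Nat) : Nat :=
  if h : 0 ≤ j ∧ text.getD j.toNat ' ' = '\\' then
    pvBackGo text (j - 1) (back + 1)
  else back
termination_by (j + 1).toNat
decreasing_by omega

-- termination fact for the outer 'while True' loop: a successful find lands strictly inside text
theorem pvFind_lt (text : List Char) (ch : Char) (i : Nat) (hi : i ≤ text.length)
    (hf : PySem.Chars.findFrom text [ch] (i : Int) none ≠ -1) :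
    (PySem.Chars.findFrom text [ch] (i : Int) none).toNat < text.length := by
  have hspec := PySem.Chars.findFrom_natCast_spec text [ch] i hi hf
  have hpre := hspec.2.1
  rcases hpre with ⟨t, ht⟩
  have hne : text.drop (PySem.Chars.findFrom text [ch] (i : Int) none).toNat ≠ [] := by
    intro h; rw [h] at ht; simp at ht
  have := List.drop_eq_nil_iff.not.mp hne
  omega

-- outer 'while True' loop of _count_unescaped (i = current search start, cnt = accumulator)
def pvCuGo (text : List Char) (ch : Char) (i cnt : Nat) (hi : i ≤ text.length) : Nat :=
  if hf : PySem.Chars.findFrom text [ch] (i : Int) none = -1 then cnt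
  else
    pvCuGo text ch ((PySem.Chars.findFrom text [ch] (i : Int) none).toNat + 1)
      (if pvBackGo text (PySem.Chars.findFrom text [ch] (i : Int) none - 1) 0 % 2 == 0
       then cnt + 1 else cnt)
      (Nat.succ_le_of_lt (pvFind_lt text ch i hi hf))
termination_by text.length - i
decreasing_by
  have h1 := (PySem.Chars.findFrom_natCast_spec text [ch] i hi hf).1
  have h2 := pvFind_lt text ch i hi hf
  omega

-- _count_unescaped(text, ch) (A only calls it with single-character ch)
def pvCountUnescaped (text : List Char) (ch : Char) : Nat :=
  pvCuGo text ch 0 0 (Nat.zero_le _)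

def basic_balance_check_py (s : String) : Bool :=
  if PySem.Str.count s "(" ≠ PySem.Str.count s ")" then false
  else if PySem.Str.count s "[" ≠ PySem.Str.count s "]" then false
  else if PySem.Str.count s "{" ≠ PySem.Str.count s "}" then false
  else if pvCountUnescaped s.toList '"' % 2 ≠ 0 then false
  else if pvCountUnescaped s.toList '\'' % 2 ≠ 0 then false
  else if pvCountUnescaped s.toList '`' % 2 ≠ 0 then false
  else true

-- ===== PORT B =====
structure PvSt where
  op : Nat
  cp : Nat
  ob : Nat
  cb : Nat
  oc : Nat
  cc : Nat
  dq : Bool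
  sq : Bool
  bq : Bool
  esc : Bool
deriving Repr, DecidableEq

def pvStep (st : PvSt) (ch : Char) : PvSt :=
  let st1 :=
    if ch = '(' then { st with op := st.op + 1 }
    else if ch = ')' then { st with cp := st.cp + 1 }
    else if ch = '[' then { st with ob := st.ob + 1 }
    else if ch = ']' then { st with cb := st.cb + 1 }
    else if ch = '{' then { st with oc := st.oc + 1 }
    else if ch = '}' then { st with cc := st.cc + 1 }
    else st
  let st2 :=
    if !st1.esc then
      if ch = '"' then { st1 with dq := !st1.dq }
      else if ch = '\'' then { st1 with sq := !st1.sq }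
      else if ch = '`' then { st1 with bq := !st1.bq }
      else st1
    else st1
  { st2 with esc := (ch == '\\') && !st.esc }

def basic_balance_check_py_alt (s : String) : Bool :=
  let st := s.toList.foldl pvStep ⟨0, 0, 0, 0, 0, 0, false, false, false, false⟩
  st.op == st.cp && st.ob == st.cb && st.oc == st.cc && !(st.dq || st.sq || st.bq)

-- ===== PRECONDITION & SPEC =====
def Spec_basic_balance_check_py (s : String) (out : Bool) : Prop := out = basic_balance_check_py_alt s
instance (s : String) (out : Bool) : Decidable (Spec_basic_balance_check_py s out) := by unfold Spec_basic_balance_check_py; infer_instance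

-- ===== CLAIM (what is proved, stated in full; the proofs are below) =====
def Claim_equal_basic_balance_check_py : Prop := ∀ (s : String), Dom_basic_balance_check_py s → Spec_basic_balance_check_py s (basic_balance_check_py s)

-- ===== LEMMAS AND PROOFS =====

def pvGoQ (c : Char) : List Char → Bool → Nat
  | [], _ => 0
  | x :: xs, e => (if (x == c) && !e then 1 else 0) + pvGoQ c xs ((x == '\\') && !e)

def pvRL (l : List Char) : Nat → Nat
  | 0 => 0
  | i + 1 => if l[i]? = some '\\' then pvRL l i + 1 else 0

def pvE (l : List Char) (i : Nat) : Bool := decide (pvRL l i % 2 = 1)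

theorem pvBackGo_eq (l : List Char) : ∀ i : Nat, i ≤ l.length → ∀ back : Nat,
    pvBackGo l ((i : Int) - 1) back = back + pvRL l i := by
  intro i
  induction i with
  | zero =>
    intro _ back
    rw [pvBackGo]
    simp [pvRL]
  | succ i ih =>
    intro hle back
    have hlt : i < l.length := by omega
    rw [pvBackGo]
    have hgd : l.getD ((i : Int) + 1 - 1).toNat ' ' = l[i] := by
      simp [List.getD_eq_getElem?_getD, List.getElem?_eq_getElem hlt]
    by_cases hb : l[i] = '\\'
    · rw [dif_pos]
      · have : ((i : Nat) : Int) + 1 - 1 - 1 = (i : Int) - 1 := by omega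
        push_cast
        rw [this, ih (by omega)]
        simp [pvRL, List.getElem?_eq_getElem hlt, hb]
        omega
      · constructor
        · omega
        · push_cast; rw [hgd]; exact hb
    · rw [dif_neg]
      · simp [pvRL, List.getElem?_eq_getElem hlt, hb]
      · push_cast; rw [not_and, hgd]; intro _; exact hb


theorem pvGoQ_zero (c : Char) : ∀ (t : List Char) (e : Bool), c ∉ t → pvGoQ c t e = 0 := by
  intro t
  induction t with
  | nil => intro e _; rfl
  | cons x xs ih =>
    intro e h
    simp only [List.mem_cons, not_or] at h
    simp [pvGoQ, ih _ h.2, beq_eq_false_iff_ne.mpr (Ne.symm (Ne.intro h.1))]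

theorem pvMem_infix {c : Char} {t : List Char} (h : c ∈ t) : [c] <:+: t := by
  rcases List.append_of_mem h with ⟨s, u, rfl⟩
  exact ⟨s, u, by simp⟩

theorem pvE_succ (l : List Char) (i : Nat) :
    pvE l (i + 1) = ((l[i]? == some '\\') && !(pvE l i)) := by
  simp only [pvE, pvRL]
  by_cases h : l[i]? = some '\\'
  · simp only [h]
    by_cases hp : pvRL l i % 2 = 1
    · simp [hp, show ¬((pvRL l i + 1) % 2 = 1) by omega]
    · simp [hp, show (pvRL l i + 1) % 2 = 1 by omega]
  · simp [h, beq_eq_false_iff_ne.mpr h]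

theorem pvGoQ_step (c : Char) (l : List Char) (j : Nat) (hj : j < l.length) :
    pvGoQ c (l.drop j) (pvE l j) =
      (if (l[j] == c) && !(pvE l j) then 1 else 0) + pvGoQ c (l.drop (j + 1)) (pvE l (j + 1)) := by
  rw [List.drop_eq_getElem_cons hj]
  simp only [pvGoQ]
  congr 1
  rw [pvE_succ, List.getElem?_eq_getElem hj]
  simp

theorem pvGoQ_skip (c : Char) (l : List Char) (m : Nat) (hm : m ≤ l.length) :
    ∀ (d k : Nat), k + d = m → (∀ j, k ≤ j → j < m → l[j]? ≠ some c) →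
      pvGoQ c (l.drop k) (pvE l k) = pvGoQ c (l.drop m) (pvE l m) := by
  intro d
  induction d with
  | zero => intro k hk _; simp_all
  | succ d ih =>
    intro k hk hno
    have hkl : k < l.length := by omega
    rw [pvGoQ_step c l k hkl]
    have hne : ¬ (l[k] == c) = true := by
      intro hb
      exact hno k le_rfl (by omega) (by rw [List.getElem?_eq_getElem hkl]; simpa using hb)
    rw [if_neg (by simp [hne])]
    rw [ih (k + 1) (by omega) (fun j h1 h2 => hno j (by omega) h2)]
    simp

theorem pvCuGo_eq (l : List Char) (c : Char) : ∀ n, ∀ i cnt (hi : i ≤ l.length),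
    l.length - i = n → pvCuGo l c i cnt hi = cnt + pvGoQ c (l.drop i) (pvE l i) := by
  intro n
  induction n using Nat.strong_induction_on with
  | _ n ihn =>
    intro i cnt hi hn
    rw [pvCuGo]
    by_cases hf : PySem.Chars.findFrom l [c] (i : Int) none = -1
    · rw [dif_pos hf]
      have hninf := (PySem.Chars.findFrom_natCast_eq_neg_one_iff l [c] i hi).mp hf
      have hnm : c ∉ l.drop i := fun h => hninf (pvMem_infix h)
      rw [pvGoQ_zero c _ _ hnm]
      simp
    · rw [dif_neg hf]
      have hspec := PySem.Chars.findFrom_natCast_spec l [c] i hi hf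
      set f := PySem.Chars.findFrom l [c] (i : Int) none with hfdef
      have hm : f.toNat < l.length := pvFind_lt l c i hi hf
      have him : i ≤ f.toNat := by omega
      -- character at the found index is c
      have hatc : l[f.toNat]? = some c := by
        rcases hspec.2.1 with ⟨t, ht⟩
        have : l.drop f.toNat = c :: t := by simpa using ht.symm
        rw [List.getElem?_eq_getElem hm]
        have := congrArg (fun xs => xs.head?) this
        simpa [List.head?_eq_getElem?, List.getElem?_drop, List.getElem?_eq_getElem hm] using this
      -- no c strictly between i and f.toNat
      have hno : ∀ j, i ≤ j → j < f.toNat → l[j]? ≠ some c := by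
        intro j h1 h2 hj
        have hjl : j < l.length := by omega
        apply hspec.2.2 j h1 h2
        rw [List.drop_eq_getElem_cons hjl]
        have : l[j] = c := by rw [List.getElem?_eq_getElem hjl] at hj; simpa using hj
        exact ⟨_, by rw [this]; rfl⟩
      -- back count is pvRL at f.toNat
      have hback : pvBackGo l (f - 1) 0 = pvRL l f.toNat := by
        have h0f : 0 ≤ f := by omega
        have hcast : f = ((f.toNat : Nat) : Int) := by omega
        conv_lhs => rw [hcast]
        rw [pvBackGo_eq l f.toNat (le_of_lt hm) 0, Nat.zero_add]
      -- the recursive call via the strong IH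
      rw [ihn (l.length - (f.toNat + 1)) (by omega) (f.toNat + 1)
        _ (Nat.succ_le_of_lt hm) rfl]
      rw [pvGoQ_skip c l f.toNat (le_of_lt hm) (f.toNat - i) i (by omega) hno]
      rw [pvGoQ_step c l f.toNat hm]
      have hlc : l[f.toNat] = c := by
        rw [List.getElem?_eq_getElem hm] at hatc; simpa using hatc
      rw [hback]
      by_cases hp : pvRL l f.toNat % 2 = 0
      · have hE : pvE l f.toNat = false := by simp [pvE]; omega
        rw [if_pos (by simpa using hp), if_pos (by simp [hlc, hE])]
        omega
      · have hE : pvE l f.toNat = true := by simp [pvE]; omega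
        rw [if_neg (by simpa using hp), if_neg (by simp [hE])]
        omega

theorem pvCountGo (c : Char) : ∀ (fuel : Nat) (l : List Char) (acc : Nat), l.length ≤ fuel →
    PySem.Chars.count.go [c] fuel l acc = acc + l.count c := by
  intro fuel
  induction fuel with
  | zero =>
    intro l acc h
    have : l = [] := by cases l <;> simp_all
    subst this
    simp [PySem.Chars.count.go]
  | succ fuel ih =>
    intro l acc h
    cases l with
    | nil => simp [PySem.Chars.count.go]
    | cons x t =>
      rw [PySem.Chars.count.go]
      by_cases hx : x = c
      · subst hx
        rw [if_pos (by simp)]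
        simp only [List.length_singleton, List.drop_one, List.tail_cons]
        rw [ih t (acc + 1) (by simpa using h)]
        simp
        omega
      · rw [if_neg (by simp [List.isPrefixOf]; intro h'; exact hx h'.symm)]
        rw [ih t acc (by simpa using h)]
        simp [hx]

theorem pvCount_singleton (l : List Char) (c : Char) :
    PySem.Chars.count l [c] = l.count c := by
  rw [PySem.Chars.count, if_neg (by simp)]
  simpa using pvCountGo c l.length l 0 le_rfl

theorem pvStep_char (st : PvSt) (x : Char) :
    pvStep st x = ⟨st.op + (if x = '(' then 1 else 0), st.cp + (if x = ')' then 1 else 0),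
      st.ob + (if x = '[' then 1 else 0), st.cb + (if x = ']' then 1 else 0),
      st.oc + (if x = '{' then 1 else 0), st.cc + (if x = '}' then 1 else 0),
      st.dq ^^ ((x == '"') && !st.esc), st.sq ^^ ((x == '\'') && !st.esc),
      st.bq ^^ ((x == '`') && !st.esc), (x == '\\') && !st.esc⟩ := by
  by_cases h1 : x = '(';  · subst h1; simp [pvStep]
  by_cases h2 : x = ')';  · subst h2; simp [pvStep]
  by_cases h3 : x = '[';  · subst h3; simp [pvStep]
  by_cases h4 : x = ']';  · subst h4; simp [pvStep]
  by_cases h5 : x = '{';  · subst h5; simp [pvStep]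
  by_cases h6 : x = '}';  · subst h6; simp [pvStep]
  by_cases h7 : x = '"'
  · subst h7; simp [pvStep]; cases st.esc <;> simp [Bool.xor_comm]
  by_cases h8 : x = '\''
  · subst h8; simp [pvStep]; cases st.esc <;> simp [Bool.xor_comm]
  by_cases h9 : x = '`'
  · subst h9; simp [pvStep]; cases st.esc <;> simp [Bool.xor_comm]
  simp [pvStep, h1, h2, h3, h4, h5, h6, h7, h8, h9]
  cases st.esc <;> simp [beq_eq_false_iff_ne.mpr h7, beq_eq_false_iff_ne.mpr h8, beq_eq_false_iff_ne.mpr h9]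

theorem pvParity_ite (b : Bool) (g : Nat) :
    (b ^^ decide (g % 2 = 1)) = decide (((if b = true then 1 else 0) + g) % 2 = 1) := by
  cases b
  · simp
  · by_cases h : g % 2 = 1
    · simp [h, show ¬((1 + g) % 2 = 1) by omega]
    · simp [h, show (1 + g) % 2 = 1 by omega]

theorem pvFold_inv : ∀ (l : List Char) (st : PvSt),
    l.foldl pvStep st =
      ⟨st.op + l.count '(', st.cp + l.count ')', st.ob + l.count '[',
       st.cb + l.count ']', st.oc + l.count '{', st.cc + l.count '}',
       st.dq ^^ decide (pvGoQ '"' l st.esc % 2 = 1),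
       st.sq ^^ decide (pvGoQ '\'' l st.esc % 2 = 1),
       st.bq ^^ decide (pvGoQ '`' l st.esc % 2 = 1),
       l.foldl (fun e x => (x == '\\') && !e) st.esc⟩ := by
  intro l
  induction l with
  | nil => intro st; simp [pvGoQ]
  | cons x xs ih =>
    intro st
    rw [List.foldl_cons, ih, pvStep_char]
    simp only [pvGoQ, List.count_cons, List.foldl_cons]
    congr 1
    all_goals first
      | rfl
      | (simp only [beq_iff_eq]; split_ifs <;> omega)
      | (rw [Bool.xor_assoc, pvParity_ite]; rfl)

-- pvE at 0 is false, and a fold over the whole list starting at 0 / false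
theorem pvE_zero (l : List Char) : pvE l 0 = false := by simp [pvE, pvRL]

theorem pvCountUnescaped_eq (l : List Char) (c : Char) :
    pvCountUnescaped l c = pvGoQ c l false := by
  rw [pvCountUnescaped, pvCuGo_eq l c (l.length - 0) 0 0 (Nat.zero_le _) rfl]
  simp [pvE_zero]

-- ===== VERDICT (by name: the statement is the Claim_ definition above) =====
theorem basic_balance_check_py_spec : Claim_equal_basic_balance_check_py := by
  intro s _
  unfold Spec_basic_balance_check_py basic_balance_check_py basic_balance_check_py_alt
  simp only [pvFold_inv, PySem.Str.count_eq, pvCountUnescaped_eq]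
  have t1 : ("(" : String).toList = ['('] := rfl
  have t2 : (")" : String).toList = [')'] := rfl
  have t3 : ("[" : String).toList = ['['] := rfl
  have t4 : ("]" : String).toList = [']'] := rfl
  have t5 : ("{" : String).toList = ['{'] := rfl
  have t6 : ("}" : String).toList = ['}'] := rfl
  rw [t1, t2, t3, t4, t5, t6]
  simp only [pvCount_singleton, Nat.zero_add, Bool.false_xor]
  split_ifs with h1 h2 h3 h4 h5 h6 <;> simp_all
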